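-- pv_equiv track=rewrite | github.com/3OeN0pX/problem-solving | 프로그래머스/0/181867. x 사이의 개수/x 사이의 개수.py | solution
-- ===== SOURCE A (Python) =====
-- def solution(myString):
--     answer = []
--
--     len = 0
--     for target in myString:
--         if target == "x":
--             answer.append(len)
--             len = 0
--             continue
--
--         len += 1
--
--     answer.append(len)
--
--
--     return answer
-- ===== SOURCE B (Python) =====
-- def solution(myString):
--     return [len(s) for s in myString.split("x")]
-- ===== Notes on version B (the rewrite author's own statement) =====
-- stated objective: simpler
-- what changed: B delegates the separator scan to str.split and maps len over the resulting segments, instead of walking the string character by character with a running counter that is appended and reset at each separator.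
import Mathlib
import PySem

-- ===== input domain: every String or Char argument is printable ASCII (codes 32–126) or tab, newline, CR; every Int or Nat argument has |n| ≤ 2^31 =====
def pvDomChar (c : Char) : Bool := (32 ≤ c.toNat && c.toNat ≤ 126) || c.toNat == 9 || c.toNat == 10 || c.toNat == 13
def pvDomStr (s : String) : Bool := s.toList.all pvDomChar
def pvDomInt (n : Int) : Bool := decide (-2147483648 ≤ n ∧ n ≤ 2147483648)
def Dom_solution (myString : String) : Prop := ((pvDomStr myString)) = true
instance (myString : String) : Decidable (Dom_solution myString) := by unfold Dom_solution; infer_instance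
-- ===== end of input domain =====

-- B replaces A's running-counter scan by str.split('x') followed by mapping len; same O(n) cost, simpler.

-- ===== PORT A =====
-- A: running counter, appended and reset at every 'x', with a final append.
def solution (myString : String) : List Int :=
  let st := myString.toList.foldl
    (fun (st : List Int × Int) target =>
      if target = 'x' then (st.1 ++ [st.2], 0) else (st.1, st.2 + 1))
    ([], 0)
  st.1 ++ [st.2]

-- ===== PORT B =====
-- B: [len(s) for s in myString.split("x")]
def solution_alt (myString : String) : List Int :=
  (PySem.Chars.splitOn myString.toList "x".toList).map (fun s => (s.length : Int))

-- ===== PRECONDITION & SPEC =====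
def Spec_solution (myString : String) (out : List Int) : Prop := out = solution_alt myString
instance (myString : String) (out : List Int) : Decidable (Spec_solution myString out) := by unfold Spec_solution; infer_instance

-- ===== CLAIM (what is proved, stated in full; the proofs are below) =====
def Claim_equal_solution : Prop := ∀ (myString : String), Dom_solution myString → Spec_solution myString (solution myString)

-- ===== LEMMAS AND PROOFS =====

/-- Reference splitter on a single-char separator 'x': `pre` is the segment built so far. -/
def splitX (pre : List Char) : List Char → List (List Char)
  | [] => [pre]
  | c :: rest => if c = 'x' then pre :: splitX [] rest else splitX (pre ++ [c]) rest

lemma splitOn_go_eq (fuel : Nat) :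
    ∀ (l cur : List Char) (acc : List (List Char)), l.length ≤ fuel →
      PySem.Chars.splitOn.go "x".toList fuel l cur acc
        = acc.reverse ++ splitX cur.reverse l := by
  induction fuel with
  | zero =>
    intro l cur acc h
    have hl : l = [] := List.eq_nil_of_length_eq_zero (Nat.le_zero.mp h)
    subst hl
    simp [PySem.Chars.splitOn.go, splitX]
  | succ n ih =>
    intro l cur acc h
    cases l with
    | nil => simp [PySem.Chars.splitOn.go, splitX]
    | cons c rest =>
      by_cases hc : c = 'x'
      · subst hc
        have : PySem.Chars.splitOn.go "x".toList (n+1) ('x' :: rest) cur acc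
            = PySem.Chars.splitOn.go "x".toList n rest [] (cur.reverse :: acc) := by
          simp [PySem.Chars.splitOn.go, List.isPrefixOf]
        rw [this, ih rest [] (cur.reverse :: acc) (by simpa using Nat.le_of_succ_le_succ h)]
        simp [splitX]
      · have : PySem.Chars.splitOn.go "x".toList (n+1) (c :: rest) cur acc
            = PySem.Chars.splitOn.go "x".toList n rest (c :: cur) acc := by
          simp [PySem.Chars.splitOn.go, List.isPrefixOf, Ne.symm hc]
        rw [this, ih rest (c :: cur) acc (by simpa using Nat.le_of_succ_le_succ h)]
        simp [splitX, hc]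

lemma splitOn_eq_splitX (cs : List Char) :
    PySem.Chars.splitOn cs "x".toList = splitX [] cs := by
  unfold PySem.Chars.splitOn
  rw [splitOn_go_eq (cs.length + 1) cs [] [] (Nat.le_succ _)]
  simp

/-- Lengths of the segments, as A computes them: running value `n` for the open segment. -/
def lenSplit (n : Int) : List Char → List Int
  | [] => [n]
  | c :: rest => if c = 'x' then n :: lenSplit 0 rest else lenSplit (n + 1) rest

lemma map_length_splitX (l : List Char) : ∀ (pre : List Char),
    (splitX pre l).map (fun s => (s.length : Int)) = lenSplit (pre.length : Int) l := by
  induction l with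
  | nil => intro pre; simp [splitX, lenSplit]
  | cons c rest ih =>
    intro pre
    by_cases hc : c = 'x'
    · simp [splitX, lenSplit, hc, ih []]
    · simpa [splitX, lenSplit, hc, Int.add_comm] using ih (pre ++ [c])

lemma foldl_eq_lenSplit (l : List Char) : ∀ (acc : List Int) (n : Int),
    (let st := l.foldl
      (fun (st : List Int × Int) target =>
        if target = 'x' then (st.1 ++ [st.2], 0) else (st.1, st.2 + 1)) (acc, n)
     st.1 ++ [st.2]) = acc ++ lenSplit n l := by
  induction l with
  | nil => intro acc n; simp [lenSplit]
  | cons c rest ih =>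
    intro acc n
    by_cases hc : c = 'x'
    · simp only [List.foldl_cons, hc]
      simpa [lenSplit, hc] using ih (acc ++ [n]) 0
    · simp only [List.foldl_cons, if_neg hc]
      simpa [lenSplit, hc] using ih acc (n + 1)

-- ===== VERDICT (by name: the statement is the Claim_ definition above) =====
theorem solution_spec : Claim_equal_solution := by
  intro myString _
  unfold Spec_solution solution solution_alt
  rw [splitOn_eq_splitX, map_length_splitX]
  simpa using foldl_eq_lenSplit myString.toList [] 0
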